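-- pv_equiv track=rewrite | github.com/SoulViolin/Advent-of-Code-2023 | Quest-15/Part-2.py | hash_algorithm
-- ===== SOURCE A (Python) =====
-- def hash_algorithm(s):
--     box = s.rsplit("=")[0].rsplit("-")[0]
--     current_value = 0
--
--     for char in box:
--         ascii_code = ord(char)
--         current_value += ascii_code
--         current_value *= 17
--         current_value %= 256
--
--     return (current_value, s)
-- ===== SOURCE B (Python) =====
-- def hash_algorithm(s):
--     # scan once, stopping at the first '=' or '-' (same truncation as the
--     # two rsplit()[0] passes), and hash the kept prefix as the polynomial
--     # sum(ord(c) * 17^power) reduced mod 256 once at the end.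
--     body = []
--     for ch in s:
--         if ch == '=' or ch == '-':
--             break
--         body.append(ch)
--     total = 0
--     power = 17
--     for ch in reversed(body):
--         total += ord(ch) * power
--         power = power * 17 % 256
--     return (total % 256, s)
-- ===== Notes on version B (the rewrite author's own statement) =====
-- stated objective: alternative
-- what changed: B replaces A's two rsplit passes by a single break-on-'='/'-' scan to find the kept prefix, and replaces the per-character Horner accumulator (add ord, x17, %256 every step) by a right-to-left weighted polynomial sum ord(c)*17^k with one final %256.
import Mathlib
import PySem

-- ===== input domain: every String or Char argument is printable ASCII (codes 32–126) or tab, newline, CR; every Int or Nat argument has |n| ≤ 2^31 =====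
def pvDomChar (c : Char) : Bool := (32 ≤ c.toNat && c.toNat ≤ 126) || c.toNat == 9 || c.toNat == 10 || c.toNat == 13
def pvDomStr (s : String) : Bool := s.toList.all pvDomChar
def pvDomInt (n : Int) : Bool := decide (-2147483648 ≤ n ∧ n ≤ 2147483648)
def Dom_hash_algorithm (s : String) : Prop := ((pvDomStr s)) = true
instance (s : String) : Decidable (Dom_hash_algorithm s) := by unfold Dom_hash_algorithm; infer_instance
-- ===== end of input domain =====

-- B replaces A's two rsplit()[0] passes by one break-on-'='/'-' scan for the kept
-- prefix, and A's per-step Horner accumulator by a right-to-left weighted polynomial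
-- sum with one final %256 (objective: alternative decomposition, same cost).

-- ===== PORT A =====
def hash_algorithm (s : String) : Int × String :=
  let box := ((PySem.Str.split? (((PySem.Str.split? s "=").getD []).headD "") "-").getD []).headD ""
  let currentValue : Int :=
    box.toList.foldl (fun (v : Int) (char : Char) =>
      PySem.Int.mod ((v + (char.toNat : Int)) * 17) 256) 0
  (currentValue, s)

-- ===== PORT B =====
def hash_algorithm_alt (s : String) : Int × String :=
  let body := s.toList.takeWhile (fun ch => !(ch == '=' || ch == '-'))
  let tp : Int × Int :=
    body.reverse.foldl (fun (tp : Int × Int) (ch : Char) =>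
      (tp.1 + (ch.toNat : Int) * tp.2, PySem.Int.mod (tp.2 * 17) 256)) (0, 17)
  (PySem.Int.mod tp.1 256, s)

-- ===== PRECONDITION & SPEC =====
def Spec_hash_algorithm (s : String) (out : Int × String) : Prop := out = hash_algorithm_alt s
instance (s : String) (out : Int × String) : Decidable (Spec_hash_algorithm s out) := by unfold Spec_hash_algorithm; infer_instance

-- ===== CLAIM (what is proved, stated in full; the proofs are below) =====
def Claim_equal_hash_algorithm : Prop := ∀ (s : String), Dom_hash_algorithm s → Spec_hash_algorithm s (hash_algorithm s)

-- ===== LEMMAS AND PROOFS =====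

-- the head of splitOn with a one-char separator is the takeWhile prefix
theorem pvGoHead (fuel : Nat) (c : Char) (l cur : List Char) (acc : List (List Char))
    (h : l.length ≤ fuel) :
    ∃ tail, PySem.Chars.splitOn.go [c] fuel l cur acc =
      acc.reverse ++ (cur.reverse ++ l.takeWhile (fun x => x != c)) :: tail := by
  induction fuel generalizing l cur acc with
  | zero =>
    have hl : l = [] := List.length_eq_zero_iff.mp (Nat.le_zero.mp h)
    subst hl
    exact ⟨[], by rw [PySem.Chars.splitOn.go.eq_def]; simp⟩
  | succ fuel ih =>
    cases l with
    | nil => exact ⟨[], by rw [PySem.Chars.splitOn.go.eq_def]; simp⟩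
    | cons a rest =>
      rw [PySem.Chars.splitOn.go.eq_def]
      simp only [List.isPrefixOf]
      by_cases hac : a = c
      · subst hac
        simp only [beq_self_eq_true, Bool.and_true, if_true, List.length_cons] at *
        obtain ⟨tail, htail⟩ := ih rest [] (cur.reverse :: acc) (Nat.le_of_succ_le_succ h)
        refine ⟨rest.takeWhile (fun x => x != a) :: tail, ?_⟩
        simp only [List.length_nil, Nat.zero_add, List.drop_one, List.tail_cons]
        rw [htail]
        simp
      · have hbeq2 : (c == a) = false := beq_false_of_ne (Ne.symm hac)
        rw [if_neg (by simp [hbeq2])]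
        obtain ⟨tail, htail⟩ := ih rest (a :: cur) acc
          (by simpa using Nat.le_of_succ_le_succ h)
        refine ⟨tail, ?_⟩
        rw [htail]
        simp [hac]

theorem pvSplitHead (c : Char) (l : List Char) :
    (PySem.Chars.splitOn l [c]).headD [] = l.takeWhile (fun x => x != c) := by
  obtain ⟨tail, htail⟩ := pvGoHead (l.length + 1) c l [] [] (Nat.le_succ _)
  unfold PySem.Chars.splitOn
  rw [htail]; simp

-- A's box on the String side: one split-head step
theorem pvStrHead (s sep : String) :
    (((PySem.Str.split? s sep).getD []).headD "").toList =
      ((PySem.Chars.split? s.toList sep.toList).getD []).headD [] := by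
  have h := PySem.Str.split?_map s sep
  cases hs : PySem.Str.split? s sep with
  | none => rw [hs] at h; simp only [Option.map_none] at h; rw [← h]; simp
  | some ps =>
    rw [hs] at h
    simp only [Option.map_some] at h
    rw [← h]
    cases ps <;> simp

theorem pvSplitSome (l : List Char) (c : Char) :
    PySem.Chars.split? l [c] = some (PySem.Chars.splitOn l [c]) := rfl

theorem pvBoxEq (s : String) :
    (((PySem.Str.split? (((PySem.Str.split? s "=").getD []).headD "") "-").getD []).headD "").toList
      = s.toList.takeWhile (fun ch => !(ch == '=' || ch == '-')) := by
  have h1 : (((PySem.Str.split? s "=").getD []).headD "").toList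
      = s.toList.takeWhile (fun x => x != '=') := by
    rw [pvStrHead, show ("=" : String).toList = ['='] from rfl, pvSplitSome,
      Option.getD_some, pvSplitHead]
  rw [pvStrHead, show ("-" : String).toList = ['-'] from rfl, h1, pvSplitSome,
    Option.getD_some, pvSplitHead, List.takeWhile_takeWhile]
  congr 1
  funext x
  by_cases hx1 : x = '=' <;> by_cases hx2 : x = '-' <;> simp [hx1, hx2]

-- pvQ r = Σ_i ord(r_i)·17^i
def pvQ : List Char → Int
  | [] => 0
  | c :: r => (c.toNat : Int) + 17 * pvQ r

theorem pvMulKey (x q : Int) : (x % 256 * q) % 256 = (x * q) % 256 := by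
  rw [Int.mul_emod, Int.emod_emod_of_dvd _ (dvd_refl (256:Int)), ← Int.mul_emod]

theorem pvB_fold (r : List Char) (t p : Int) :
    (r.foldl (fun (tp : Int × Int) (ch : Char) =>
      (tp.1 + (ch.toNat : Int) * tp.2, PySem.Int.mod (tp.2 * 17) 256)) (t, p)).1 % 256 =
    (t + p * pvQ r) % 256 := by
  induction r generalizing t p with
  | nil => simp [pvQ]
  | cons c r ih =>
    simp only [List.foldl_cons, pvQ]
    rw [PySem.Int.mod_eq_emod_of_pos (by norm_num : (0:Int) < 256), ih]
    have h1 : t + p * ((c.toNat : Int) + 17 * pvQ r) = (t + (c.toNat : Int) * p) + (p * 17) * pvQ r := by ring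
    rw [h1, Int.add_emod (t + (c.toNat : Int) * p) (p * 17 % 256 * pvQ r), pvMulKey, ← Int.add_emod]

theorem pvA_fold (r : List Char) :
    r.reverse.foldl (fun (v : Int) (char : Char) =>
      PySem.Int.mod ((v + (char.toNat : Int)) * 17) 256) 0 = (17 * pvQ r) % 256 := by
  induction r with
  | nil => simp [pvQ]
  | cons c r ih =>
    simp only [List.reverse_cons, List.foldl_append, List.foldl_cons, List.foldl_nil, ih, pvQ]
    rw [PySem.Int.mod_eq_emod_of_pos (by norm_num : (0:Int) < 256)]
    have h1 : (17 : Int) * ((c.toNat : Int) + 17 * pvQ r) = 17 * (c.toNat : Int) + 17 * (17 * pvQ r) := by ring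
    rw [h1]
    generalize ((17 : Int) * pvQ r) = a
    omega

theorem pvHash_eq (l : List Char) :
    l.foldl (fun (v : Int) (char : Char) =>
      PySem.Int.mod ((v + (char.toNat : Int)) * 17) 256) 0 =
    PySem.Int.mod ((l.reverse.foldl (fun (tp : Int × Int) (ch : Char) =>
      (tp.1 + (ch.toNat : Int) * tp.2, PySem.Int.mod (tp.2 * 17) 256)) (0, 17)).1) 256 := by
  rw [PySem.Int.mod_eq_emod_of_pos (by norm_num : (0:Int) < 256), pvB_fold]
  have h := pvA_fold l.reverse
  rw [List.reverse_reverse] at h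
  rw [h]; ring_nf

-- ===== VERDICT (by name: the statement is the Claim_ definition above) =====
theorem hash_algorithm_spec : Claim_equal_hash_algorithm := by
  intro s _
  unfold Spec_hash_algorithm hash_algorithm hash_algorithm_alt
  simp only [pvBoxEq s]
  exact congrArg (fun v => (v, s)) (pvHash_eq _)
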